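-- pv_equiv track=rewrite | github.com/NargathKain/NLP_24-25 | text_pipelines/pipeline_textblob_1/pipeline_1.py | _reorganize_by_pos
-- ===== SOURCE A (Python) =====
-- from typing import List, Tuple
--
-- def _reorganize_by_pos(words: List[str], tags: List[Tuple[str, str]], noun_phrases: List[str]) -> str:
--     # Αυτόματη προσθήκη POS tags από TextBlob:
--     # - Υποκείμενο Subject (nouns/pronouns: NN*, PRP*)
--     # - Ρήμα Verbs (VB*)
--     # - Αντικείμενο - Objects and complements
--     # - Modifiers (adjectives/adverbs: JJ*, RB*)
--     # Οργανώνει αυτόματα σε SVO με τα POS tags του TextBlob χωρίς custom κανόνες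
--
--     # Διαχωρισμός ανά κατηγορίες (αυτόματα από το textblob)
--     subjects = []
--     verbs = []
--     objects = []
--     modifiers = []
--     others = []
--
--     for word, tag in tags:
--         if tag.startswith('NN') or tag.startswith('PRP'):  # Nouns and pronouns
--             subjects.append(word)
--         elif tag.startswith('VB'):  # Verbs
--             verbs.append(word)
--         elif tag.startswith('JJ') or tag.startswith('RB'):  # Adjectives and adverbs
--             modifiers.append(word)
--         elif tag in ['DT', 'IN', 'TO', 'CC']:  # Determiners, prepositions, conjunctions
--             others.append(word)
--         else:
--             objects.append(word)
--
--     # Αυτόματη κατασκευή πρότασης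
--     result_parts = []
--
--     # Πρώτα το υποκείμενο
--     if subjects: result_parts.extend(subjects)  # όριο για αποφυγή πλεονασμού
--
--     # μετά το ρήμα
--     if verbs: result_parts.extend(verbs)
--
--     # και μετά το αντικείμενο
--     if objects: result_parts.extend(objects)
--
--     if modifiers: result_parts.extend(modifiers)
--
--     # Προσθήκη υπόλοιπων λέξεων στη πρόταση
--     if others: result_parts.extend(others)
--
--     # Αν η ανακατασκευή δεν ήταν καλή, επιστρέφει το αρχικό
--     if not result_parts: return " ".join(words)
--
--     return " ".join(result_parts)
-- ===== SOURCE B (Python) =====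
-- def _rank(tag):
--     if tag.startswith('NN') or tag.startswith('PRP'):
--         return 0
--     if tag.startswith('VB'):
--         return 1
--     if tag.startswith('JJ') or tag.startswith('RB'):
--         return 3
--     if tag in ['DT', 'IN', 'TO', 'CC']:
--         return 4
--     return 2
--
--
-- def _reorganize_by_pos(words, tags, noun_phrases):
--     # One stable sort by category rank replaces the five explicit buckets.
--     parts = [w for w, _ in sorted(tags, key=lambda p: _rank(p[1]))]
--     return " ".join(parts) if parts else " ".join(words)
-- ===== Notes on version B (the rewrite author's own statement) =====
-- stated objective: idiomatic
-- what changed: Replaces the five explicit bucket lists and the guarded extend chain by a single stable sort of the tagged words keyed by category rank, relying on sort stability to reproduce the within-category order.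
import Mathlib
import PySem

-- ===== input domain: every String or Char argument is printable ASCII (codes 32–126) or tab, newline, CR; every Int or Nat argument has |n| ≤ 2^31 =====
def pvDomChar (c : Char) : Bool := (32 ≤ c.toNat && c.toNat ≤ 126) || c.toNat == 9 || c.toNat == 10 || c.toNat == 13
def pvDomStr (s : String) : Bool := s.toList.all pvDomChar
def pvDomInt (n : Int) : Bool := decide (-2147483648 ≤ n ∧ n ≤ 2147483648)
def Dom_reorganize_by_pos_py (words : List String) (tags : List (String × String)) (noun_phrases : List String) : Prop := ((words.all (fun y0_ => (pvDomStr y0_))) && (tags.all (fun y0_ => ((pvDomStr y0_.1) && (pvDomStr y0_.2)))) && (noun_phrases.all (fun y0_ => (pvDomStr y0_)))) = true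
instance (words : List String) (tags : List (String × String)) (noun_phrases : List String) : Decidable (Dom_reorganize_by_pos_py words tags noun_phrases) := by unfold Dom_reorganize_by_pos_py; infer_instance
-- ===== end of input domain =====

-- B replaces A's five explicit bucket lists and guarded extend chain by ONE stable
-- sort of the tagged words keyed by category rank (objective: more idiomatic).

-- ===== PORT A =====
-- literal transliteration of A: one pass filling five bucket lists, then a chain of
-- 'if bucket:' extends, then the empty-result fallback.
def reorganize_by_pos_py (words : List String) (tags : List (String × String)) (noun_phrases : List String) : String :=
  let st := tags.foldl
    (fun (acc : List String × List String × List String × List String × List String) wt =>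
      let subjects := acc.1
      let verbs := acc.2.1
      let objects := acc.2.2.1
      let modifiers := acc.2.2.2.1
      let others := acc.2.2.2.2
      let word := wt.1
      let tag := wt.2
      if PySem.Str.startswith tag "NN" || PySem.Str.startswith tag "PRP" then
        (subjects ++ [word], verbs, objects, modifiers, others)
      else if PySem.Str.startswith tag "VB" then
        (subjects, verbs ++ [word], objects, modifiers, others)
      else if PySem.Str.startswith tag "JJ" || PySem.Str.startswith tag "RB" then
        (subjects, verbs, objects, modifiers ++ [word], others)
      else if tag == "DT" || tag == "IN" || tag == "TO" || tag == "CC" then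
        (subjects, verbs, objects, modifiers, others ++ [word])
      else
        (subjects, verbs, objects ++ [word], modifiers, others))
    ([], [], [], [], [])
  let result_parts : List String := []
  let result_parts := if st.1 ≠ [] then result_parts ++ st.1 else result_parts
  let result_parts := if st.2.1 ≠ [] then result_parts ++ st.2.1 else result_parts
  let result_parts := if st.2.2.1 ≠ [] then result_parts ++ st.2.2.1 else result_parts
  let result_parts := if st.2.2.2.1 ≠ [] then result_parts ++ st.2.2.2.1 else result_parts
  let result_parts := if st.2.2.2.2 ≠ [] then result_parts ++ st.2.2.2.2 else result_parts
  if result_parts = [] then PySem.Str.join " " words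
  else PySem.Str.join " " result_parts

-- ===== PORT B =====
-- B-side helper: category rank (the key of the stable sort)
def pvRank (tag : String) : Nat :=
  if PySem.Str.startswith tag "NN" || PySem.Str.startswith tag "PRP" then 0
  else if PySem.Str.startswith tag "VB" then 1
  else if PySem.Str.startswith tag "JJ" || PySem.Str.startswith tag "RB" then 3
  else if tag == "DT" || tag == "IN" || tag == "TO" || tag == "CC" then 4
  else 2

def reorganize_by_pos_py_alt (words : List String) (tags : List (String × String)) (noun_phrases : List String) : String :=
  let parts := (PySem.List.sorted tags (fun p => pvRank p.2)).map (fun p => p.1)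
  if parts ≠ [] then PySem.Str.join " " parts else PySem.Str.join " " words

-- ===== PRECONDITION & SPEC =====
def Spec_reorganize_by_pos_py (words : List String) (tags : List (String × String)) (noun_phrases : List String) (out : String) : Prop := out = reorganize_by_pos_py_alt words tags noun_phrases
instance (words : List String) (tags : List (String × String)) (noun_phrases : List String) (out : String) : Decidable (Spec_reorganize_by_pos_py words tags noun_phrases out) := by unfold Spec_reorganize_by_pos_py; infer_instance

-- ===== CLAIM (what is proved, stated in full; the proofs are below) =====
def Claim_equal_reorganize_by_pos_py : Prop := ∀ (words : List String) (tags : List (String × String)) (noun_phrases : List String), Dom_reorganize_by_pos_py words tags noun_phrases → Spec_reorganize_by_pos_py words tags noun_phrases (reorganize_by_pos_py words tags noun_phrases)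

-- ===== LEMMAS AND PROOFS =====

-- the i-th bucket of A, described as a filter by rank
def pvBucket (i : Nat) (tags : List (String × String)) : List (String × String) :=
  tags.filter (fun p => pvRank p.2 == i)

-- the concatenation A builds, as pairs
def pvBuckets (tags : List (String × String)) : List (String × String) :=
  pvBucket 0 tags ++ pvBucket 1 tags ++ pvBucket 2 tags ++ pvBucket 3 tags ++ pvBucket 4 tags

lemma mem_pvBucket_rank {i : Nat} {p : String × String} {ts : List (String × String)}
    (h : p ∈ pvBucket i ts) : pvRank p.2 = i := by
  have := (List.mem_filter.mp h).2
  simpa using this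

lemma insertBy_append_skip {α : Type} (before : α → α → Bool) (x : α) (L1 L2 : List α)
    (h : ∀ y ∈ L1, before x y = false) :
    PySem.List.insertBy before x (L1 ++ L2) = L1 ++ PySem.List.insertBy before x L2 := by
  induction L1 with
  | nil => simp
  | cons a t ih =>
    have ha : before x a = false := h a (by simp)
    simp [PySem.List.insertBy, ha, ih (fun y hy => h y (by simp [hy]))]

lemma insertBy_front {α : Type} (before : α → α → Bool) (x : α) (L : List α)
    (h : ∀ y ∈ L, before x y = true) :
    PySem.List.insertBy before x L = x :: L := by
  cases L with
  | nil => rfl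
  | cons a t => simp [PySem.List.insertBy, h a (by simp)]

lemma insertBy_mid {α : Type} (before : α → α → Bool) (x : α) (L1 L2 : List α)
    (h1 : ∀ y ∈ L1, before x y = false) (h2 : ∀ y ∈ L2, before x y = true) :
    PySem.List.insertBy before x (L1 ++ L2) = L1 ++ x :: L2 := by
  rw [insertBy_append_skip _ _ _ _ h1, insertBy_front _ _ _ h2]

lemma pvRank_cases (t : String) :
    pvRank t = 0 ∨ pvRank t = 1 ∨ pvRank t = 2 ∨ pvRank t = 3 ∨ pvRank t = 4 := by
  unfold pvRank; split_ifs <;> simp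

lemma insert_pvBuckets (ts : List (String × String)) (x : String × String) :
    PySem.List.insertBy (fun a b => decide (pvRank a.2 < pvRank b.2)) x (pvBuckets ts)
      = pvBuckets (ts ++ [x]) := by
  have hb : ∀ i, pvBucket i (ts ++ [x])
      = pvBucket i ts ++ (if pvRank x.2 = i then [x] else []) := by
    intro i
    by_cases hxi : pvRank x.2 = i <;> simp [pvBucket, List.filter_append, hxi]
  have skip : ∀ i, i ≤ pvRank x.2 → ∀ y ∈ pvBucket i ts,
      (decide (pvRank x.2 < pvRank y.2)) = false := by
    intro i hi y hy
    have := mem_pvBucket_rank hy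
    simp [this]; omega
  have front : ∀ i, pvRank x.2 < i → ∀ y ∈ pvBucket i ts,
      (decide (pvRank x.2 < pvRank y.2)) = true := by
    intro i hi y hy
    have := mem_pvBucket_rank hy
    simp [this]; omega
  unfold pvBuckets
  simp only [hb]
  rcases pvRank_cases x.2 with h | h | h | h | h
  · have := insertBy_mid (fun a b => decide (pvRank a.2 < pvRank b.2)) x
      (pvBucket 0 ts)
      (pvBucket 1 ts ++ pvBucket 2 ts ++ pvBucket 3 ts ++ pvBucket 4 ts)
      (fun y hy => skip 0 (by omega) y hy)
      (by intro y hy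
          rcases List.mem_append.mp hy with h' | h'
          rcases List.mem_append.mp h' with h'' | h''
          rcases List.mem_append.mp h'' with h3 | h3
          exacts [front 1 (by omega) y h3, front 2 (by omega) y h3,
                  front 3 (by omega) y h'', front 4 (by omega) y h'])
    simp only [List.append_assoc] at this ⊢
    rw [this]; simp [h]
  · have := insertBy_mid (fun a b => decide (pvRank a.2 < pvRank b.2)) x
      (pvBucket 0 ts ++ pvBucket 1 ts)
      (pvBucket 2 ts ++ pvBucket 3 ts ++ pvBucket 4 ts)
      (by intro y hy
          rcases List.mem_append.mp hy with h' | h'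
          exacts [skip 0 (by omega) y h', skip 1 (by omega) y h'])
      (by intro y hy
          rcases List.mem_append.mp hy with h' | h'
          rcases List.mem_append.mp h' with h'' | h''
          exacts [front 2 (by omega) y h'', front 3 (by omega) y h'',
                  front 4 (by omega) y h'])
    simp only [List.append_assoc] at this ⊢
    rw [this]; simp [h]
  · have := insertBy_mid (fun a b => decide (pvRank a.2 < pvRank b.2)) x
      (pvBucket 0 ts ++ pvBucket 1 ts ++ pvBucket 2 ts)
      (pvBucket 3 ts ++ pvBucket 4 ts)
      (by intro y hy
          rcases List.mem_append.mp hy with h' | h'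
          rcases List.mem_append.mp h' with h'' | h''
          exacts [skip 0 (by omega) y h'', skip 1 (by omega) y h'',
                  skip 2 (by omega) y h'])
      (by intro y hy
          rcases List.mem_append.mp hy with h' | h'
          exacts [front 3 (by omega) y h', front 4 (by omega) y h'])
    simp only [List.append_assoc] at this ⊢
    rw [this]; simp [h]
  · have := insertBy_mid (fun a b => decide (pvRank a.2 < pvRank b.2)) x
      (pvBucket 0 ts ++ pvBucket 1 ts ++ pvBucket 2 ts ++ pvBucket 3 ts)
      (pvBucket 4 ts)
      (by intro y hy
          rcases List.mem_append.mp hy with h' | h'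
          rcases List.mem_append.mp h' with h'' | h''
          rcases List.mem_append.mp h'' with h3 | h3
          exacts [skip 0 (by omega) y h3, skip 1 (by omega) y h3,
                  skip 2 (by omega) y h'', skip 3 (by omega) y h'])
      (fun y hy => front 4 (by omega) y hy)
    simp only [List.append_assoc] at this ⊢
    rw [this]; simp [h]
  · have := PySem.List.insertBy_of_forall_not_before
      (fun a b => decide (pvRank a.2 < pvRank b.2)) x
      (pvBucket 0 ts ++ pvBucket 1 ts ++ pvBucket 2 ts ++ pvBucket 3 ts ++ pvBucket 4 ts)
      (by intro y hy
          rcases List.mem_append.mp hy with h' | h'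
          rcases List.mem_append.mp h' with h'' | h''
          rcases List.mem_append.mp h'' with h3 | h3
          rcases List.mem_append.mp h3 with h4 | h4
          exacts [skip 0 (by omega) y h4, skip 1 (by omega) y h4,
                  skip 2 (by omega) y h3, skip 3 (by omega) y h'',
                  skip 4 (by omega) y h'])
    simp only [List.append_assoc] at this ⊢
    rw [this]; simp [h]

lemma sorted_eq_pvBuckets (ts : List (String × String)) :
    PySem.List.sorted ts (fun p => pvRank p.2) = pvBuckets ts := by
  induction ts using List.reverseRecOn with
  | nil => rfl
  | append_singleton ts x ih =>
    rw [PySem.List.sorted_eq_foldl_insertBy, List.foldl_append] at *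
    simp only [List.foldl_cons, List.foldl_nil]
    rw [ih, insert_pvBuckets]

-- proof-side name for A's loop body (definitionally the lambda inside reorganize_by_pos_py)
def pvStep (acc : List String × List String × List String × List String × List String)
    (wt : String × String) :
    List String × List String × List String × List String × List String :=
  let subjects := acc.1
  let verbs := acc.2.1
  let objects := acc.2.2.1
  let modifiers := acc.2.2.2.1
  let others := acc.2.2.2.2
  let word := wt.1
  let tag := wt.2
  if PySem.Str.startswith tag "NN" || PySem.Str.startswith tag "PRP" then
    (subjects ++ [word], verbs, objects, modifiers, others)
  else if PySem.Str.startswith tag "VB" then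
    (subjects, verbs ++ [word], objects, modifiers, others)
  else if PySem.Str.startswith tag "JJ" || PySem.Str.startswith tag "RB" then
    (subjects, verbs, objects, modifiers ++ [word], others)
  else if tag == "DT" || tag == "IN" || tag == "TO" || tag == "CC" then
    (subjects, verbs, objects, modifiers, others ++ [word])
  else
    (subjects, verbs, objects ++ [word], modifiers, others)

lemma pvBucket_cons (i : Nat) (p : String × String) (ts : List (String × String)) :
    pvBucket i (p :: ts)
      = (if pvRank p.2 = i then [p] else []) ++ pvBucket i ts := by
  by_cases h : pvRank p.2 = i <;> simp [pvBucket, h]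

lemma foldA_pvStep_eq (ts : List (String × String)) (s v o m ot : List String) :
    ts.foldl pvStep (s, v, o, m, ot)
    = (s ++ (pvBucket 0 ts).map (fun p => p.1),
       v ++ (pvBucket 1 ts).map (fun p => p.1),
       o ++ (pvBucket 2 ts).map (fun p => p.1),
       m ++ (pvBucket 3 ts).map (fun p => p.1),
       ot ++ (pvBucket 4 ts).map (fun p => p.1)) := by
  induction ts generalizing s v o m ot with
  | nil => simp [pvBucket]
  | cons p t ih =>
    rw [List.foldl_cons]
    by_cases h0 : (PySem.Str.startswith p.2 "NN" || PySem.Str.startswith p.2 "PRP") = true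
    · have hstep : pvStep (s, v, o, m, ot) p = (s ++ [p.1], v, o, m, ot) := by
        simp only [pvStep]; rw [if_pos h0]
      have hr : pvRank p.2 = 0 := by unfold pvRank; rw [if_pos h0]
      rw [hstep, ih]; simp [pvBucket_cons, hr]
    · by_cases h1 : PySem.Str.startswith p.2 "VB" = true
      · have hstep : pvStep (s, v, o, m, ot) p = (s, v ++ [p.1], o, m, ot) := by
          simp only [pvStep]; rw [if_neg h0, if_pos h1]
        have hr : pvRank p.2 = 1 := by unfold pvRank; rw [if_neg h0, if_pos h1]
        rw [hstep, ih]; simp [pvBucket_cons, hr]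
      · by_cases h2 : (PySem.Str.startswith p.2 "JJ" || PySem.Str.startswith p.2 "RB") = true
        · have hstep : pvStep (s, v, o, m, ot) p = (s, v, o, m ++ [p.1], ot) := by
            simp only [pvStep]; rw [if_neg h0, if_neg h1, if_pos h2]
          have hr : pvRank p.2 = 3 := by unfold pvRank; rw [if_neg h0, if_neg h1, if_pos h2]
          rw [hstep, ih]; simp [pvBucket_cons, hr]
        · by_cases h3 : (p.2 == "DT" || p.2 == "IN" || p.2 == "TO" || p.2 == "CC") = true
          · have hstep : pvStep (s, v, o, m, ot) p = (s, v, o, m, ot ++ [p.1]) := by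
              simp only [pvStep]; rw [if_neg h0, if_neg h1, if_neg h2, if_pos h3]
            have hr : pvRank p.2 = 4 := by
              unfold pvRank; rw [if_neg h0, if_neg h1, if_neg h2, if_pos h3]
            rw [hstep, ih]; simp [pvBucket_cons, hr]
          · have hstep : pvStep (s, v, o, m, ot) p = (s, v, o ++ [p.1], m, ot) := by
              simp only [pvStep]; rw [if_neg h0, if_neg h1, if_neg h2, if_neg h3]
            have hr : pvRank p.2 = 2 := by
              unfold pvRank; rw [if_neg h0, if_neg h1, if_neg h2, if_neg h3]
            rw [hstep, ih]; simp [pvBucket_cons, hr]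

lemma guard_extend (acc l : List String) :
    (if l ≠ [] then acc ++ l else acc) = acc ++ l := by
  split <;> simp_all

-- ===== VERDICT (by name: the statement is the Claim_ definition above) =====
theorem reorganize_by_pos_py_spec : Claim_equal_reorganize_by_pos_py := by
  intro words tags noun_phrases _
  show _ = _
  unfold reorganize_by_pos_py reorganize_by_pos_py_alt
  rw [show (tags.foldl
    (fun (acc : List String × List String × List String × List String × List String) wt =>
      let subjects := acc.1
      let verbs := acc.2.1
      let objects := acc.2.2.1
      let modifiers := acc.2.2.2.1
      let others := acc.2.2.2.2
      let word := wt.1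
      let tag := wt.2
      if PySem.Str.startswith tag "NN" || PySem.Str.startswith tag "PRP" then
        (subjects ++ [word], verbs, objects, modifiers, others)
      else if PySem.Str.startswith tag "VB" then
        (subjects, verbs ++ [word], objects, modifiers, others)
      else if PySem.Str.startswith tag "JJ" || PySem.Str.startswith tag "RB" then
        (subjects, verbs, objects, modifiers ++ [word], others)
      else if tag == "DT" || tag == "IN" || tag == "TO" || tag == "CC" then
        (subjects, verbs, objects, modifiers, others ++ [word])
      else
        (subjects, verbs, objects ++ [word], modifiers, others))
    ([], [], [], [], []))
    = tags.foldl pvStep ([], [], [], [], []) from rfl]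
  rw [foldA_pvStep_eq, sorted_eq_pvBuckets]
  simp only [guard_extend]
  simp only [pvBuckets, List.map_append, List.nil_append]
  by_cases hL : ((pvBucket 0 tags).map (fun p => p.1) ++ (pvBucket 1 tags).map (fun p => p.1)
      ++ (pvBucket 2 tags).map (fun p => p.1) ++ (pvBucket 3 tags).map (fun p => p.1)
      ++ (pvBucket 4 tags).map (fun p => p.1)) = []
  · rw [if_pos hL, if_neg (by simp_all)]
  · rw [if_neg hL, if_pos hL]
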